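-- pv_equiv track=rewrite | github.com/mintcookie-park/ormi3 | 프로그래머스_쌍둥이빌딩숲.py | solve
-- ===== SOURCE A (Python) =====
-- cache = {(1,1): 1}
--
-- def solve(i, j):
--     if i == 0 or j == 0:
--         return 0
--
--     if (i, j) in cache:
--         return cache[(i,j)]
--
--     v = solve(i-1, j-1) + solve(i-1, j)*2*(i-1)
--     cache[(i,j)] = v % 1000000007
--
--     return cache[(i,j)]
-- ===== SOURCE B (Python) =====
-- def solve(i, j):
--     # Iterative bottom-up DP over rows a = 1..i; row[b-1] holds dp[a][b] mod 1e9+7.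
--     # dp is identically 0 above the diagonal, so j > i returns 0 directly.
--     if i <= 0 or j <= 0 or i < j:
--         return 0
--     MOD = 1000000007
--     row = [1] + [0] * (j - 1)          # row for a = 1
--     for a in range(2, i + 1):
--         row = [((row[b - 1] if b > 0 else 0) + row[b] * 2 * (a - 1)) % MOD
--                for b in range(j)]
--     return row[j - 1]
-- ===== Notes on version B (the rewrite author's own statement) =====
-- stated objective: faster
-- what changed: Replaced the top-down recursion with a module-level memo dict by an iterative bottom-up DP over a rolling 1-D row (dp[a][b] = dp[a-1][b-1] + dp[a-1][b]*2*(a-1) mod 1e9+7), returning 0 directly when j > i where the recurrence is identically zero.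
-- outside the precondition, e.g. on solve(997, 2): A returns 908963858, B returns 908963858
import Mathlib
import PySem

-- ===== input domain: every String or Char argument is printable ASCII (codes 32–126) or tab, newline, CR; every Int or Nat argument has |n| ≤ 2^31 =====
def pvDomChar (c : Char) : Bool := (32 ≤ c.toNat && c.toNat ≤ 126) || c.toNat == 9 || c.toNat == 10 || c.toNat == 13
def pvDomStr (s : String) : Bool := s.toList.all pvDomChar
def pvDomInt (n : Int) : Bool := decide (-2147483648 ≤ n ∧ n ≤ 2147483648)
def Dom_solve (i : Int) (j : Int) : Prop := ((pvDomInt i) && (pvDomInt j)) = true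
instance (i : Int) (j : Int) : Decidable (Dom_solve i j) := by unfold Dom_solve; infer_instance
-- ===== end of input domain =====

-- ===== PORT A =====

-- B replaces A's recursion + module-level memo dict by an iterative bottom-up row DP
-- (rolling 1-D row), returning 0 directly when j > i (where the recurrence is identically 0).

-- ===== PORT A =====
-- Literal port of A: recursion on (i, j) with the memo dict (`cache`) threaded as state.
-- `fuel` only makes the recursion structural; it is i.toNat at the top call, which is
-- exactly the depth the Python recursion needs when 0 ≤ i (inside Pre_solve).
def solveMemoA : Nat → PySem.Dict (Int × Int) Int → Int → Int → Int × PySem.Dict (Int × Int) Int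
  | 0, c, _, _ => (0, c)
  | Nat.succ f, c, i, j =>
    if i = 0 ∨ j = 0 then (0, c)
    else
      match c.get? (i, j) with
      | some v => (v, c)
      | none =>
        let r1 := solveMemoA f c (i-1) (j-1)
        let r2 := solveMemoA f r1.2 (i-1) j
        let v := r1.1 + r2.1 * 2 * (i-1)
        (PySem.Int.mod v 1000000007, (r2.2.insert (i, j) (PySem.Int.mod v 1000000007)))

-- the module-level `cache = {(1,1): 1}`
def cacheA : PySem.Dict (Int × Int) Int := PySem.Dict.ofList [((1, 1), 1)]

def solve (i : Int) (j : Int) : Int := (solveMemoA i.toNat cacheA i j).1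

-- ===== PORT B =====
def solve_alt (i : Int) (j : Int) : Int :=
  if i ≤ 0 ∨ j ≤ 0 ∨ i < j then 0
  else
    PySem.List.pyGetD
      ((PySem.List.pyRange 2 (i+1) 1).foldl
        (fun row a =>
          (PySem.List.pyRange 0 j 1).map
            (fun b =>
              PySem.Int.mod
                ((if b > 0 then PySem.List.pyGetD row (b-1) 0 else 0)
                  + PySem.List.pyGetD row b 0 * 2 * (a-1)) 1000000007))
        (1 :: List.replicate (j.toNat - 1) 0))
      (j-1) 0

-- ===== PRECONDITION & SPEC =====
-- Pre_ excludes exactly the inputs on which A raises RecursionError: negative i (the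
-- recursion i -> i-1 never reaches the i == 0 guard, so it recurses forever and raises),
-- and i > 995 with j != 0, where A's roughly i-deep recursion exceeds CPython's default
-- recursion limit of 1000 (measured: A returns at i = 998 and raises at i = 999 from a
-- top-level call; the exact boundary shifts by the few frames already on the stack, so
-- Pre_ stops at 995). Under an interpreter whose recursion limit was raised, A would
-- return on some i > 995 and agree with B there; those inputs stay excluded because the
-- boundary is not a closed-form function of the input.
def Pre_solve (i : Int) (j : Int) : Prop := 0 ≤ i ∧ (j = 0 ∨ i ≤ 995)
instance (i : Int) (j : Int) : Decidable (Pre_solve i j) := by unfold Pre_solve; infer_instance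
def pvWitness_solve : Int × Int := (5, 3)

def Spec_solve (i : Int) (j : Int) (out : Int) : Prop := out = solve_alt i j
instance (i : Int) (j : Int) (out : Int) : Decidable (Spec_solve i j out) := by unfold Spec_solve; infer_instance

-- ===== CLAIM (what is proved, stated in full; the proofs are below) =====
def Claim_equal_solve : Prop := ∀ (i : Int) (j : Int), Dom_solve i j → Pre_solve i j → Spec_solve i j (solve i j)

-- ===== LEMMAS AND PROOFS =====

-- Mathematical value of the recurrence, with values kept reduced mod 1e9+7 exactly as the
-- programs keep them.
def F (i j : Int) : Int :=
  if i ≤ 0 ∨ j ≤ 0 then 0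
  else if i = 1 ∧ j = 1 then 1
  else PySem.Int.mod (F (i-1) (j-1) + F (i-1) j * 2 * (i-1)) 1000000007
termination_by i.toNat
decreasing_by all_goals omega

lemma F_base {i j : Int} (h : i ≤ 0 ∨ j ≤ 0) : F i j = 0 := by
  rw [F]; simp [h]

lemma F_one_one : F 1 1 = 1 := by rw [F]; norm_num

lemma F_step {i j : Int} (hi : 0 < i) (hj : 0 < j) (hne : ¬ (i = 1 ∧ j = 1)) :
    F i j = PySem.Int.mod (F (i-1) (j-1) + F (i-1) j * 2 * (i-1)) 1000000007 := by
  rw [F]; simp only [if_neg (by omega : ¬ (i ≤ 0 ∨ j ≤ 0)), if_neg hne]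

lemma F_neg_j {i j : Int} (hj : j < 0) : F i j = 0 := F_base (Or.inr (by omega))

-- dp[i][j] = 0 above the diagonal
lemma F_zero_of_lt : ∀ (n : Nat) (i j : Int), i.toNat = n → 0 ≤ i → i < j → F i j = 0 := by
  intro n
  induction n with
  | zero => intro i j hn hi hij; exact F_base (Or.inl (by omega))
  | succ m ih =>
    intro i j hn hi hij
    rw [F_step (by omega) (by omega) (by omega)]
    rw [ih (i-1) (j-1) (by omega) (by omega) (by omega),
        ih (i-1) j (by omega) (by omega) (by omega)]
    simp [PySem.Int.mod]

-- ---- A side: the memo cache always stores correct values ----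
def InvA (c : PySem.Dict (Int × Int) Int) : Prop :=
  c.get? (1, 1) = some 1 ∧ ∀ p v, c.get? p = some v → v = F p.1 p.2

lemma cacheA_eq : cacheA = PySem.Dict.mk [((1, 1), 1)] := by decide

lemma invA_cacheA : InvA cacheA := by
  constructor
  · decide
  · intro p v h
    rw [cacheA_eq, PySem.Dict.get?_mk_cons] at h
    by_cases hp : (((1, 1) : Int × Int) == p) = true
    · simp only [if_pos hp, Option.some.injEq] at h
      rw [← eq_of_beq hp, ← h]; exact F_one_one.symm
    · rw [if_neg hp] at h
      simp [PySem.Dict.get?] at h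

lemma solveMemoA_correct : ∀ (f : Nat) (i j : Int) (c : PySem.Dict (Int × Int) Int),
    0 ≤ i → i.toNat ≤ f → InvA c →
    (solveMemoA f c i j).1 = F i j ∧ InvA (solveMemoA f c i j).2 := by
  intro f
  induction f with
  | zero =>
    intro i j c hi hf hinv
    have hiz : i = 0 := by omega
    subst hiz
    exact ⟨(F_base (Or.inl le_rfl)).symm, hinv⟩
  | succ m ih =>
    intro i j c hi hf hinv
    by_cases hcond : i = 0 ∨ j = 0
    · simp only [solveMemoA, if_pos hcond]
      exact ⟨(F_base (by omega)).symm, hinv⟩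
    · have hi1 : 1 ≤ i := by omega
      have hjne : j ≠ 0 := by omega
      cases hc : c.get? (i, j) with
      | some v =>
        have hred : solveMemoA (Nat.succ m) c i j = (v, c) := by
          simp only [solveMemoA, if_neg hcond, hc]
        rw [hred]
        exact ⟨hinv.2 (i, j) v hc, hinv⟩
      | none =>
        have hne11 : (i, j) ≠ ((1, 1) : Int × Int) := by
          intro h
          rw [h, hinv.1] at hc
          simp at hc
        obtain ⟨h1v, h1inv⟩ := ih (i-1) (j-1) c (by omega) (by omega) hinv
        obtain ⟨h2v, h2inv⟩ := ih (i-1) j (solveMemoA m c (i-1) (j-1)).2 (by omega) (by omega) h1inv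
        have hred : solveMemoA (Nat.succ m) c i j =
            (PySem.Int.mod ((solveMemoA m c (i-1) (j-1)).1
                + (solveMemoA m (solveMemoA m c (i-1) (j-1)).2 (i-1) j).1 * 2 * (i-1)) 1000000007,
             ((solveMemoA m (solveMemoA m c (i-1) (j-1)).2 (i-1) j).2.insert (i, j)
                (PySem.Int.mod ((solveMemoA m c (i-1) (j-1)).1
                  + (solveMemoA m (solveMemoA m c (i-1) (j-1)).2 (i-1) j).1 * 2 * (i-1)) 1000000007))) := by
          simp only [solveMemoA, if_neg hcond, hc]
        rw [hred]
        have hval : PySem.Int.mod ((solveMemoA m c (i-1) (j-1)).1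
            + (solveMemoA m (solveMemoA m c (i-1) (j-1)).2 (i-1) j).1 * 2 * (i-1)) 1000000007
            = F i j := by
          rw [h1v, h2v]
          by_cases hj : 0 < j
          · rw [F_step (i := i) (j := j) (by omega) hj
              (by intro h; exact hne11 (by rw [h.1, h.2]))]
          · have hjn : j < 0 := by omega
            rw [F_neg_j (by omega : j - 1 < 0), F_neg_j hjn, F_neg_j hjn]
            simp [PySem.Int.mod]
        refine ⟨hval, ?_, ?_⟩
        · rw [PySem.Dict.get?_insert_of_ne _ _ (Ne.symm hne11)]
          exact h2inv.1
        · intro p v h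
          rw [PySem.Dict.get?_insert] at h
          by_cases hp : p = (i, j)
          · rw [if_pos hp] at h
            cases h
            rw [hp]
            exact hval
          · rw [if_neg hp] at h
            exact h2inv.2 p v h

lemma solve_eq_F (i j : Int) (hi : 0 ≤ i) : solve i j = F i j :=
  (solveMemoA_correct i.toNat i j cacheA hi le_rfl invA_cacheA).1

-- ---- B side: the rolling row holds F a (b+1) for b = 0..j-1 ----
def rowFor (j : Int) (a : Int) : List Int :=
  (List.range j.toNat).map (fun b : Nat => F a ((b : Int) + 1))

lemma F_one_col (k : Int) (hk : 2 ≤ k) : F 1 k = 0 := by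
  rw [F_step (i := 1) (j := k) (by omega) (by omega) (by omega)]
  rw [F_base (Or.inl (by omega)), F_base (Or.inl (by omega))]
  simp [PySem.Int.mod]

lemma row0_eq (j : Int) (hj : 1 ≤ j) :
    (1 :: List.replicate (j.toNat - 1) 0 : List Int) = rowFor j 1 := by
  apply List.ext_getElem
  · simp [rowFor]; omega
  · intro n h1 h2
    simp only [List.length_cons, List.length_replicate] at h1
    simp only [rowFor, List.getElem_map, List.getElem_range]
    cases n with
    | zero => simpa using F_one_one.symm
    | succ m =>
      rw [List.getElem_cons_succ, List.getElem_replicate,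
        show F 1 ((((m + 1 : Nat)) : Int) + 1) = 0 from F_one_col _ (by push_cast; omega)]

lemma rowFor_getD (j a : Int) (m : Nat) (hm : m < j.toNat) :
    PySem.List.pyGetD (rowFor j a) (m : Int) 0 = F a ((m : Int) + 1) := by
  rw [PySem.List.pyGetD_natCast]
  simp [rowFor, List.getD_eq_getElem?_getD, hm]

lemma row_step (j a : Int) (hj : 1 ≤ j) (ha : 2 ≤ a) :
    (PySem.List.pyRange 0 j 1).map
      (fun b =>
        PySem.Int.mod
          ((if b > 0 then PySem.List.pyGetD (rowFor j (a-1)) (b-1) 0 else 0)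
            + PySem.List.pyGetD (rowFor j (a-1)) b 0 * 2 * (a-1)) 1000000007)
    = rowFor j a := by
  rw [PySem.List.pyRange_one, List.map_map]
  simp only [Int.sub_zero]
  conv_rhs => rw [show rowFor j a = (List.range j.toNat).map
    (fun b : Nat => F a ((b : Int) + 1)) from rfl]
  apply List.map_congr_left
  intro k hk
  have hkj : k < j.toNat := by
    have := List.mem_range.mp hk
    omega
  have hk0 : (0 : Int) + (k : Int) = (k : Int) := by omega
  simp only [Function.comp_apply, hk0]
  have hleft : (if ((k : Int)) > 0
      then PySem.List.pyGetD (rowFor j (a-1)) ((k : Int) - 1) 0 else 0)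
      = F (a-1) (k : Int) := by
    match k with
    | 0 => simp [F_base (Or.inr le_rfl)]
    | Nat.succ m =>
      rw [if_pos (by push_cast; omega)]
      have h1 : ((m + 1 : Nat) : Int) - 1 = (m : Int) := by push_cast; omega
      rw [h1, rowFor_getD j (a-1) m (by omega)]
      norm_cast
  rw [hleft, rowFor_getD j (a-1) k hkj]
  rw [F_step (i := a) (j := (k : Int) + 1) (by omega) (by omega) (by omega)]
  have h2 : (k : Int) + 1 - 1 = (k : Int) := by omega
  rw [h2]

lemma fold_rows (j : Int) (hj : 1 ≤ j) :
    ∀ (n : Nat) (i : Int), i.toNat = n → 1 ≤ i →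
      (PySem.List.pyRange 2 (i+1) 1).foldl
        (fun row a =>
          (PySem.List.pyRange 0 j 1).map
            (fun b =>
              PySem.Int.mod
                ((if b > 0 then PySem.List.pyGetD row (b-1) 0 else 0)
                  + PySem.List.pyGetD row b 0 * 2 * (a-1)) 1000000007))
        (rowFor j 1)
      = rowFor j i := by
  intro n
  induction n with
  | zero => intro i hn hi; omega
  | succ m ih =>
    intro i hn hi
    by_cases h1 : i = 1
    · subst h1
      have he : PySem.List.pyRange 2 (1+1) 1 = [] := by decide
      rw [he]; rfl
    · have hi2 : 2 ≤ i := by omega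
      have hsplit : PySem.List.pyRange 2 (i+1) 1 = PySem.List.pyRange 2 i 1 ++ [i] := by
        have := PySem.List.pyRange_one_succ_right (a := 2) (b := i) (by omega)
        simpa using this
      have hIH := ih (i-1) (by omega) (by omega)
      rw [show i - 1 + 1 = i from by omega] at hIH
      rw [hsplit, List.foldl_append, hIH]
      simp only [List.foldl_cons, List.foldl_nil]
      exact row_step j i hj hi2

lemma solve_alt_eq_F (i j : Int) (hi : 0 ≤ i) : solve_alt i j = F i j := by
  unfold solve_alt
  by_cases hz : i ≤ 0 ∨ j ≤ 0 ∨ i < j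
  · rw [if_pos hz]
    rcases hz with h | h | h
    · exact (F_base (Or.inl h)).symm
    · exact (F_base (Or.inr h)).symm
    · exact (F_zero_of_lt i.toNat i j rfl hi h).symm
  · push_neg at hz
    obtain ⟨hi1, hj1, hij⟩ := hz
    rw [if_neg (by push_neg; exact ⟨hi1, hj1, hij⟩)]
    rw [row0_eq j (by omega), fold_rows j (by omega) i.toNat i rfl (by omega)]
    have hj' : j - 1 = ((j.toNat - 1 : Nat) : Int) := by omega
    rw [hj', rowFor_getD j i (j.toNat - 1) (by omega)]
    have h3 : ((j.toNat - 1 : Nat) : Int) + 1 = j := by omega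
    rw [h3]

-- ===== VERDICT (by name: the statement is the Claim_ definition above) =====
theorem solve_spec : Claim_equal_solve := by
  intro i j _ hpre
  unfold Spec_solve
  rw [solve_eq_F i j hpre.1, solve_alt_eq_F i j hpre.1]
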